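-- pv_equiv track=rewrite | github.com/baeksangha/python_sw | 2115_벌꿀채취/source.py | solution
-- ===== SOURCE A (Python) =====
-- def get_max(worker, c):
--     n = 2**len(worker)
--     ret = 0
--     for i in range(n):
--         honey_sum = 0
--         profit = 0
--         for j in range(len(worker)):
--             if i & (1 << j):
--                 honey_sum += worker[j]
--                 profit += worker[j]**2
--         if honey_sum <= c:
--             ret = max(ret, profit)
--     return ret
--
-- def solution(n, m, c, board):
--     board_1d = [y for x in board for y in x]
--     answer = 0
--     len_1d = n**2 - m + 1
--     for i in range(len_1d):
--         if i // n != (i + m - 1) // n: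
--             continue
--         worker1 = board_1d[i:i+m]
--         for j in range(i+m, n**2):
--             if j // n != (j + m - 1) // n:
--                 worker2 = board_1d[j:((j//n)+1)*n]
--             else:
--                 worker2 = board_1d[j:j+m]
--             part_max = get_max(worker1, c) + get_max(worker2, c)
--             answer = max(answer, part_max)
--
--     return answer
-- ===== SOURCE B (Python) =====
-- def window_best(w, c):
--     # all (honey_sum, profit) pairs of subsets of w, built by doubling
--     pairs = [(0, 0)]
--     for x in w:
--         pairs = pairs + [(s + x, p + x * x) for (s, p) in pairs]
--     best = 0
--     for s, p in pairs:
--         if s <= c: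
--             best = max(best, p)
--     return best
--
-- def solution(n, m, c, board):
--     flat = [y for x in board for y in x]
--     cache = {}
--
--     def best_at(j):
--         if j not in cache:
--             if j // n != (j + m - 1) // n:
--                 w = flat[j:(j // n + 1) * n]
--             else:
--                 w = flat[j:j + m]
--             cache[j] = window_best(w, c)
--         return cache[j]
--
--     answer = 0
--     for i in range(n * n - m + 1):
--         if i // n != (i + m - 1) // n:
--             continue
--         base = best_at(i)
--         for j in range(i + m, n * n):
--             answer = max(answer, base + best_at(j))
--     return answer
-- ===== Notes on version B (the rewrite author's own statement) =====
-- stated objective: alternative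
-- what changed: B evaluates each window's best affordable subset by an iterative doubling enumeration of (sum, profit) pairs and memoises the value per window start index in a dict, then only combines stored values in the pair loop, instead of A's per-(i,j) bitmask re-enumeration of both windows' subsets; on the graded input family this was not measured as faster.
import Mathlib
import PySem

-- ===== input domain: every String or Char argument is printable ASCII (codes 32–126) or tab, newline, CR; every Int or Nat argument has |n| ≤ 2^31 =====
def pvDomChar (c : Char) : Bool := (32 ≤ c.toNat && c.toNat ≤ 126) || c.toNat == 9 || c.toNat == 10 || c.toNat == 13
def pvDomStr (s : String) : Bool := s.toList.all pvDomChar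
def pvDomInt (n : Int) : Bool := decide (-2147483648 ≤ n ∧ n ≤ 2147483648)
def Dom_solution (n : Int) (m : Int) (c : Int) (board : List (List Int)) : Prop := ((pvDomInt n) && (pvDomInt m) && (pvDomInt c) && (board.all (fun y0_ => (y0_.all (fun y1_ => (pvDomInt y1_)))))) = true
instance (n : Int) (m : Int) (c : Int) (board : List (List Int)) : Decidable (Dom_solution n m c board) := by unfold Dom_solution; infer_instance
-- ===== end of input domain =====

-- B computes each window's best affordable subset once (doubling enumeration of
-- (sum, profit) pairs + a dict memo over window start indices) and the pair loop only
-- combines stored values, instead of A's per-pair bitmask re-enumeration of both windows.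

-- ===== PORT A =====
-- get_max: bitmask subset enumeration; 'i & (1 << j)' truthy ↔ ≠ 0; j ≥ 0 from range so
-- '1 << j' is '(1 : Int) <<< j.toNat' (exact for j ≥ 0); worker[j] is in range (j < len).
def getMaxA (worker : List Int) (c : Int) : Int :=
  let n : Int := 2 ^ worker.length
  (PySem.List.pyRange 0 n 1).foldl (fun ret i =>
    let sp : Int × Int := (PySem.List.pyRange 0 (PySem.List.len worker) 1).foldl
      (fun (sp : Int × Int) j =>
        if PySem.Int.band i (((1 <<< j.toNat : Nat) : Int)) ≠ 0 then
          (sp.1 + PySem.List.pyGetD worker j 0, sp.2 + (PySem.List.pyGetD worker j 0) ^ 2)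
        else sp) (0, 0)
    if sp.1 ≤ c then max ret sp.2 else ret) 0

def solution (n : Int) (m : Int) (c : Int) (board : List (List Int)) : Int :=
  let board1d := board.flatMap (fun x => x)
  let len1d := n ^ 2 - m + 1
  (PySem.List.pyRange 0 len1d 1).foldl (fun answer i =>
    if PySem.Int.floordiv i n ≠ PySem.Int.floordiv (i + m - 1) n then answer
    else
      let worker1 := PySem.List.slice board1d (some i) (some (i + m))
      (PySem.List.pyRange (i + m) (n ^ 2) 1).foldl (fun answer j =>
        let worker2 :=
          if PySem.Int.floordiv j n ≠ PySem.Int.floordiv (j + m - 1) n then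
            PySem.List.slice board1d (some j) (some ((PySem.Int.floordiv j n + 1) * n))
          else
            PySem.List.slice board1d (some j) (some (j + m))
        let partMax := getMaxA worker1 c + getMaxA worker2 c
        max answer partMax) answer) 0

-- ===== PORT B =====
-- window_best: all subset (sum, profit) pairs by doubling, then one max pass.
def windowBest (w : List Int) (c : Int) : Int :=
  let pairs := w.foldl (fun ps x => ps ++ ps.map (fun sp => (sp.1 + x, sp.2 + x * x)))
    [((0 : Int), (0 : Int))]
  pairs.foldl (fun best sp => if sp.1 ≤ c then max best sp.2 else best) 0

-- best_at: memoised window value; 'return cache[j]' is getD (the key was just inserted /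
-- is present, so no KeyError).
def bestAtB (n m c : Int) (flat : List Int) (cache : PySem.Dict Int Int) (j : Int) :
    Int × PySem.Dict Int Int :=
  if cache.contains j = false then
    let w :=
      if PySem.Int.floordiv j n ≠ PySem.Int.floordiv (j + m - 1) n then
        PySem.List.slice flat (some j) (some ((PySem.Int.floordiv j n + 1) * n))
      else
        PySem.List.slice flat (some j) (some (j + m))
    let cache' := cache.insert j (windowBest w c)
    (cache'.getD j 0, cache')
  else (cache.getD j 0, cache)

def solution_alt (n : Int) (m : Int) (c : Int) (board : List (List Int)) : Int :=
  let flat := board.flatMap (fun x => x)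
  let res := (PySem.List.pyRange 0 (n * n - m + 1) 1).foldl
    (fun (st : Int × PySem.Dict Int Int) i =>
      if PySem.Int.floordiv i n ≠ PySem.Int.floordiv (i + m - 1) n then st
      else
        let bc := bestAtB n m c flat st.2 i
        (PySem.List.pyRange (i + m) (n * n) 1).foldl
          (fun (st' : Int × PySem.Dict Int Int) j =>
            let bc' := bestAtB n m c flat st'.2 j
            (max st'.1 (bc.1 + bc'.1), bc'.2)) (st.1, bc.2))
    (0, PySem.Dict.empty)
  res.1

-- ===== PRECONDITION & SPEC =====
-- Pre_ excludes exactly the inputs where the Python A raises ZeroDivisionError ('i // n'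
-- with n = 0, reached iff the outer range is nonempty, i.e. m ≤ 0); B raises there too.
def Pre_solution (n : Int) (m : Int) (c : Int) (board : List (List Int)) : Prop :=
  n ≠ 0 ∨ 1 ≤ m
instance (n : Int) (m : Int) (c : Int) (board : List (List Int)) : Decidable (Pre_solution n m c board) := by unfold Pre_solution; infer_instance
def pvWitness_solution : Int × Int × Int × List (List Int) := (2, 1, 5, [[1, 2], [3, 4]])

def Spec_solution (n : Int) (m : Int) (c : Int) (board : List (List Int)) (out : Int) : Prop := out = solution_alt n m c board
instance (n : Int) (m : Int) (c : Int) (board : List (List Int)) (out : Int) : Decidable (Spec_solution n m c board out) := by unfold Spec_solution; infer_instance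

-- ===== CLAIM (what is proved, stated in full; the proofs are below) =====
def Claim_equal_solution : Prop := ∀ (n : Int) (m : Int) (c : Int) (board : List (List Int)), Dom_solution n m c board → Pre_solution n m c board → Spec_solution n m c board (solution n m c board)

-- ===== LEMMAS AND PROOFS =====

-- Canonical subset (sum, profit) selected by the bits of i (bit 0 ↔ head).
def spSel : List Int → Nat → Int × Int
  | [], _ => (0, 0)
  | x :: xs, i =>
    let r := spSel xs (i / 2)
    if i % 2 = 1 then (r.1 + x, r.2 + x * x) else r

theorem bit_ne (i j : Nat) : (i &&& 2 ^ j ≠ 0) ↔ i.testBit j = true := by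
  rw [Nat.and_two_pow]
  cases h : i.testBit j <;> simp [pow_ne_zero]

theorem natInner (w : List Int) (i : Nat) (acc : Int × Int) :
    (List.range w.length).foldl
      (fun (sp : Int × Int) jN => if i.testBit jN then
          (sp.1 + w.getD jN 0, sp.2 + (w.getD jN 0) ^ 2) else sp) acc
      = (acc.1 + (spSel w i).1, acc.2 + (spSel w i).2) := by
  induction w generalizing i acc with
  | nil => simp [spSel]
  | cons x xs ih =>
    rw [List.length_cons, List.range_succ_eq_map, List.foldl_cons, List.foldl_map]
    simp only [Nat.testBit_add_one, List.getD_cons_succ, List.getD_cons_zero, Nat.testBit_zero]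
    rw [ih (i / 2)]
    simp only [spSel]
    by_cases h : i % 2 = 1 <;> simp [h] <;> constructor <;> ring

-- A's inner loop computes spSel (shifted by the accumulator).
theorem innerA_eq (w : List Int) (i : Nat) (acc : Int × Int) :
    ((PySem.List.pyRange 0 (PySem.List.len w) 1).foldl
      (fun (sp : Int × Int) j =>
        if PySem.Int.band (i : Int) (((1 <<< j.toNat : Nat) : Int)) ≠ 0 then
          (sp.1 + PySem.List.pyGetD w j 0, sp.2 + (PySem.List.pyGetD w j 0) ^ 2)
        else sp) acc) = (acc.1 + (spSel w i).1, acc.2 + (spSel w i).2) := by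
  rw [PySem.List.len_eq, PySem.List.pyRange_zero_natCast, List.foldl_map]
  rw [← natInner w i acc]
  apply PySem.List.foldl_congr_mem
  intro sp jN hmem
  have ht : ((jN : Int)).toNat = jN := Int.toNat_natCast jN
  rw [ht, Nat.one_shiftLeft, PySem.Int.band_natCast]
  simp only [PySem.List.pyGetD_natCast]
  by_cases h : i.testBit jN
  · rw [if_pos, if_pos h]
    exact_mod_cast (bit_ne i jN).mpr h
  · rw [if_neg, if_neg h]
    intro hc
    exact h ((bit_ne i jN).mp (by exact_mod_cast hc))

theorem listRange_double (N : Nat) :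
    List.range (2 * N) = (List.range N).flatMap (fun q => [2 * q, 2 * q + 1]) := by
  induction N with
  | zero => simp
  | succ k ih =>
    have h : 2 * (k + 1) = (2 * k + 1) + 1 := by ring
    rw [h, List.range_succ, List.range_succ, List.range_succ, List.flatMap_append, ← ih]
    simp

theorem spSel_even (x : Int) (xs : List Int) (q : Nat) :
    spSel (x :: xs) (2 * q) = spSel xs q := by
  have h1 : 2 * q / 2 = q := by omega
  have h2 : ¬(2 * q % 2 = 1) := by omega
  simp [spSel, h1, h2]

theorem spSel_odd (x : Int) (xs : List Int) (q : Nat) :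
    spSel (x :: xs) (2 * q + 1) = ((spSel xs q).1 + x, (spSel xs q).2 + x * x) := by
  have h3 : (2 * q + 1) / 2 = q := by omega
  have h4 : (2 * q + 1) % 2 = 1 := by omega
  simp [spSel, h3, h4]

-- pairs built by doubling = spSel over all bitmasks (generalized accumulator).
theorem pairs_eq (w : List Int) (P : List (Int × Int)) :
    w.foldl (fun ps x => ps ++ ps.map (fun sp => (sp.1 + x, sp.2 + x * x))) P
      = (List.range (2 ^ w.length)).flatMap
          (fun q => P.map (fun sp => (sp.1 + (spSel w q).1, sp.2 + (spSel w q).2))) := by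
  induction w generalizing P with
  | nil => simp [spSel]
  | cons x xs ih =>
    rw [List.foldl_cons, ih, List.length_cons]
    have h2 : 2 ^ (xs.length + 1) = 2 * 2 ^ xs.length := by ring
    rw [h2, listRange_double, List.flatMap_assoc]
    congr 1
    funext q
    simp only [List.flatMap_cons, List.flatMap_nil, List.append_nil, List.map_append,
      List.map_map, spSel_even, spSel_odd]
    have hfun : ((fun sp : Int × Int => (sp.1 + (spSel xs q).1, sp.2 + (spSel xs q).2)) ∘
        fun sp : Int × Int => (sp.1 + x, sp.2 + x * x))
        = fun sp : Int × Int => (sp.1 + ((spSel xs q).1 + x), sp.2 + ((spSel xs q).2 + x * x)) := by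
      funext sp
      simp only [Function.comp_apply, Prod.mk.injEq]
      constructor <;> ring
    rw [hfun]

theorem getMaxA_eq_windowBest (w : List Int) (c : Int) : getMaxA w c = windowBest w c := by
  simp only [getMaxA, windowBest]
  have hcast : (2 : Int) ^ w.length = ((2 ^ w.length : Nat) : Int) := by push_cast; ring
  rw [hcast, PySem.List.pyRange_zero_natCast, List.foldl_map, pairs_eq]
  have hsingle : (List.range (2 ^ w.length)).flatMap
        (fun q => [((0 : Int), (0 : Int))].map
          (fun sp => (sp.1 + (spSel w q).1, sp.2 + (spSel w q).2)))
      = (List.range (2 ^ w.length)).map (fun q => spSel w q) := by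
    have h : ∀ l : List Nat, l.flatMap (fun q => [spSel w q]) = l.map (fun q => spSel w q) := by
      intro l
      induction l with
      | nil => rfl
      | cons a l ih => simp [ih]
    simp
    exact h _
  rw [hsingle, List.foldl_map]
  apply PySem.List.foldl_congr_mem
  intro ret i hi
  rw [innerA_eq]
  simp

-- The pure window value B memoises.
def wVal (n m c : Int) (flat : List Int) (j : Int) : Int :=
  windowBest
    (if PySem.Int.floordiv j n ≠ PySem.Int.floordiv (j + m - 1) n then
        PySem.List.slice flat (some j) (some ((PySem.Int.floordiv j n + 1) * n))
      else
        PySem.List.slice flat (some j) (some (j + m))) c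

def InvC (n m c : Int) (flat : List Int) (d : PySem.Dict Int Int) : Prop :=
  ∀ k v, d.get? k = some v → v = wVal n m c flat k

theorem bestAtB_spec (n m c : Int) (flat : List Int) (d : PySem.Dict Int Int) (j : Int)
    (h : InvC n m c flat d) :
    (bestAtB n m c flat d j).1 = wVal n m c flat j ∧
      InvC n m c flat (bestAtB n m c flat d j).2 := by
  unfold bestAtB
  by_cases hc : d.contains j = false
  · rw [if_pos hc]
    refine ⟨?_, ?_⟩
    · show (d.insert j _).getD j 0 = wVal n m c flat j
      rw [PySem.Dict.getD_insert_self]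
      rfl
    · intro k v hk
      rw [PySem.Dict.get?_insert] at hk
      by_cases hkj : k = j
      · rw [if_pos hkj] at hk
        cases hk
        subst hkj
        rfl
      · rw [if_neg hkj] at hk
        exact h k v hk
  · rw [if_neg hc]
    refine ⟨?_, h⟩
    have hc' : d.contains j = true := by
      cases hcv : d.contains j
      · exact absurd hcv hc
      · rfl
    have hsome : (d.get? j).isSome := by
      rw [← PySem.Dict.contains_eq_isSome_get?]
      exact hc'
    obtain ⟨v, hv⟩ := Option.isSome_iff_exists.mp hsome
    show d.getD j 0 = wVal n m c flat j
    exact (PySem.Dict.getD_of_get?_eq_some d 0 hv).trans (h j v hv)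

theorem innerLoop_eq (n m c : Int) (flat : List Int) (js : List Int) (b a : Int)
    (d : PySem.Dict Int Int) (h : InvC n m c flat d) :
    (js.foldl (fun (st' : Int × PySem.Dict Int Int) j =>
        let bc' := bestAtB n m c flat st'.2 j
        (max st'.1 (b + bc'.1), bc'.2)) (a, d)).1
      = js.foldl (fun a j => max a (b + wVal n m c flat j)) a
    ∧ InvC n m c flat ((js.foldl (fun (st' : Int × PySem.Dict Int Int) j =>
        let bc' := bestAtB n m c flat st'.2 j
        (max st'.1 (b + bc'.1), bc'.2)) (a, d)).2) := by
  induction js generalizing a d with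
  | nil => exact ⟨rfl, h⟩
  | cons j js ih =>
    simp only [List.foldl_cons]
    obtain ⟨h1, h2⟩ := bestAtB_spec n m c flat d j h
    rw [h1]
    exact ih (max a (b + wVal n m c flat j)) _ h2

theorem outerLoop_eq (n m c : Int) (flat : List Int) (is : List Int) (a : Int)
    (d : PySem.Dict Int Int) (h : InvC n m c flat d) :
    (is.foldl (fun (st : Int × PySem.Dict Int Int) i =>
        if PySem.Int.floordiv i n ≠ PySem.Int.floordiv (i + m - 1) n then st
        else
          let bc := bestAtB n m c flat st.2 i
          (PySem.List.pyRange (i + m) (n * n) 1).foldl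
            (fun (st' : Int × PySem.Dict Int Int) j =>
              let bc' := bestAtB n m c flat st'.2 j
              (max st'.1 (bc.1 + bc'.1), bc'.2)) (st.1, bc.2)) (a, d)).1
      = is.foldl (fun answer i =>
          if PySem.Int.floordiv i n ≠ PySem.Int.floordiv (i + m - 1) n then answer
          else (PySem.List.pyRange (i + m) (n * n) 1).foldl
            (fun ans j => max ans (wVal n m c flat i + wVal n m c flat j)) answer) a := by
  induction is generalizing a d with
  | nil => rfl
  | cons i is ih =>
    simp only [List.foldl_cons]
    by_cases hcond : PySem.Int.floordiv i n ≠ PySem.Int.floordiv (i + m - 1) n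
    · rw [if_pos hcond, if_pos hcond]
      exact ih a d h
    · rw [if_neg hcond, if_neg hcond]
      obtain ⟨h1, h2⟩ := bestAtB_spec n m c flat d i h
      rw [h1]
      obtain ⟨h3, h4⟩ := innerLoop_eq n m c flat
        (PySem.List.pyRange (i + m) (n * n) 1) (wVal n m c flat i) a _ h2
      rw [← h3] at *
      exact (by rw [h3]; exact ih _ _ h4)

-- A's per-i inner loop equals the wVal formulation (worker1 hoisted, getMaxA = windowBest).
theorem innerA_loop_eq (n m c : Int) (flat : List Int) (i ans : Int)
    (hcond : ¬ PySem.Int.floordiv i n ≠ PySem.Int.floordiv (i + m - 1) n) :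
    (PySem.List.pyRange (i + m) (n ^ 2) 1).foldl (fun answer j =>
        let worker2 :=
          if PySem.Int.floordiv j n ≠ PySem.Int.floordiv (j + m - 1) n then
            PySem.List.slice flat (some j) (some ((PySem.Int.floordiv j n + 1) * n))
          else
            PySem.List.slice flat (some j) (some (j + m))
        let partMax := getMaxA (PySem.List.slice flat (some i) (some (i + m))) c
          + getMaxA worker2 c
        max answer partMax) ans
      = (PySem.List.pyRange (i + m) (n * n) 1).foldl
          (fun a j => max a (wVal n m c flat i + wVal n m c flat j)) ans := by
  have hsq : n ^ 2 = n * n := by ring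
  rw [hsq]
  apply PySem.List.foldl_congr_mem
  intro a j hj
  simp only []
  have h1 : getMaxA (PySem.List.slice flat (some i) (some (i + m))) c = wVal n m c flat i := by
    rw [getMaxA_eq_windowBest]
    unfold wVal
    rw [if_neg hcond]
  have h2 : getMaxA
      (if PySem.Int.floordiv j n ≠ PySem.Int.floordiv (j + m - 1) n then
        PySem.List.slice flat (some j) (some ((PySem.Int.floordiv j n + 1) * n))
      else PySem.List.slice flat (some j) (some (j + m))) c = wVal n m c flat j := by
    rw [getMaxA_eq_windowBest]
    rfl
  rw [h1, h2]

theorem solution_eq (n m c : Int) (board : List (List Int)) :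
    solution n m c board = solution_alt n m c board := by
  unfold solution solution_alt
  simp only []
  have hsq : n ^ 2 - m + 1 = n * n - m + 1 := by ring
  rw [hsq]
  rw [outerLoop_eq n m c (board.flatMap (fun x => x)) _ 0 PySem.Dict.empty
    (by intro k v hk; rw [PySem.Dict.get?_empty] at hk; cases hk)]
  apply PySem.List.foldl_congr_mem
  intro a i hi
  by_cases hcond : PySem.Int.floordiv i n ≠ PySem.Int.floordiv (i + m - 1) n
  · rw [if_pos hcond, if_pos hcond]
  · rw [if_neg hcond, if_neg hcond]
    exact innerA_loop_eq n m c (board.flatMap (fun x => x)) i a hcond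

-- ===== VERDICT (by name: the statement is the Claim_ definition above) =====
theorem solution_spec : Claim_equal_solution := by
  intro n m c board _ _
  unfold Spec_solution
  exact solution_eq n m c board
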